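-- pv_equiv track=rewrite | github.com/Takshak1/database_assignment2 | sql_normalization_engine.py | _resolve_parent_table
-- ===== SOURCE A (Python) =====
-- from typing import Any, Dict, List, Optional, Tuple
--
-- def _resolve_parent_table(
--
--     container_map: Dict[Optional[str], str],
--     parent_path: Optional[str],
--     default: str,
-- ) -> str:
--     if parent_path in container_map:
--         return container_map[parent_path]
--     if parent_path:
--         # Try progressively removing segments
--         segments = parent_path.split(".")
--         while segments:
--             candidate = ".".join(segments)
--             if candidate in container_map:
--                 return container_map[candidate]
--             segments.pop()
--     return container_map.get(None, default)
-- ===== SOURCE B (Python) =====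
-- from typing import Any, Dict, List, Optional, Tuple
--
-- def _resolve_parent_table(
--     container_map: Dict[Optional[str], str],
--     parent_path: Optional[str],
--     default: str,
-- ) -> str:
--     if parent_path in container_map:
--         return container_map[parent_path]
--     if parent_path and "." in parent_path:
--         return _resolve_parent_table(container_map, parent_path.rsplit(".", 1)[0], default)
--     return container_map.get(None, default)
-- ===== Notes on version B (the rewrite author's own statement) =====
-- stated objective: simpler
-- what changed: Replaces A's split-into-segments plus while/pop/join loop with direct recursion on the dotted path: probe the path, then recurse on rsplit('.', 1)[0]; no segment list is ever materialized.
import Mathlib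
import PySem

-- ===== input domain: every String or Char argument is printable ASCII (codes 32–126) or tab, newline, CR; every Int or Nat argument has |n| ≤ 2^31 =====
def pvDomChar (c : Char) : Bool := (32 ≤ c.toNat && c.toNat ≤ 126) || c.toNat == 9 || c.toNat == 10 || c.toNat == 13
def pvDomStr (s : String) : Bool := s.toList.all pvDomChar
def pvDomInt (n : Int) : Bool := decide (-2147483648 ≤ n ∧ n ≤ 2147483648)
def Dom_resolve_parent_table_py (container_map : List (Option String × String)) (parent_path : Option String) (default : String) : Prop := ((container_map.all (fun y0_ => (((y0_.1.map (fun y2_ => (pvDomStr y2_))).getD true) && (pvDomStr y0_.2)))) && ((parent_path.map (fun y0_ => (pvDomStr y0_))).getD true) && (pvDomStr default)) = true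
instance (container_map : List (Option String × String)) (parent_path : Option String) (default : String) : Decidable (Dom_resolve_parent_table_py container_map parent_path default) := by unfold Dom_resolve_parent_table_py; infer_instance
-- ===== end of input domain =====

-- B replaces A's split/while/join/pop loop over a segment list by direct recursion on the
-- dotted path (rsplit off the last segment); same return value, different decomposition.

-- ===== PORT A =====
-- dict membership / subscript / get on the association-list dict: first matching key
def pvLookup (cm : List (Option String × String)) (k : Option String) : Option String :=
  (cm.find? (fun p => p.1 == k)).map (·.2)

-- A's 'while segments:' loop; the segments of parent_path are carried as List Char
def pvALoop (cm : List (Option String × String)) (segs : List (List Char)) : Option String :=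
  if h : segs = [] then none
  else
    match pvLookup cm (some (String.ofList (PySem.Chars.join ['.'] segs))) with
    | some v => some v
    | none => pvALoop cm segs.dropLast
termination_by segs.length
decreasing_by
  have hpos : 0 < segs.length := List.length_pos_of_ne_nil h
  simp only [List.length_dropLast]; omega

def resolve_parent_table_py (container_map : List (Option String × String)) (parent_path : Option String) (default : String) : String :=
  match pvLookup container_map parent_path with
  | some v => v
  | none =>
    match (match parent_path with
           | some s =>
             if s.toList ≠ [] then pvALoop container_map (PySem.Chars.splitOn s.toList ['.'])
             else none
           | none => none) with
    | some v => v
    | none => (pvLookup container_map none).getD default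

-- ===== PORT B =====
-- parent_path.rsplit(".", 1)[0] for a path containing '.': the characters before the LAST '.'
-- (hand-ported: exact because a single-char separator splits at the last occurrence of '.')
def pvRsplitPrefix (cs : List Char) : List Char :=
  ((cs.reverse.dropWhile (· ≠ '.')).drop 1).reverse

def pvBRec (cm : List (Option String × String)) (default : String) (cs : List Char) : String :=
  match pvLookup cm (some (String.ofList cs)) with
  | some v => v
  | none =>
    if cs ≠ [] ∧ '.' ∈ cs then pvBRec cm default (pvRsplitPrefix cs)
    else (pvLookup cm none).getD default
termination_by cs.length
decreasing_by
  have h1 := List.length_dropWhile_le (fun x => decide (x ≠ '.')) cs.reverse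
  have hpos : 0 < cs.length := List.length_pos_of_ne_nil (by tauto)
  simp only [pvRsplitPrefix, List.length_reverse, List.length_drop] at *
  omega

def resolve_parent_table_py_alt (container_map : List (Option String × String)) (parent_path : Option String) (default : String) : String :=
  match parent_path with
  | some s => pvBRec container_map default s.toList
  | none =>
    match pvLookup container_map none with
    | some v => v
    | none => default

-- ===== PRECONDITION & SPEC =====
def Spec_resolve_parent_table_py (container_map : List (Option String × String)) (parent_path : Option String) (default : String) (out : String) : Prop := out = resolve_parent_table_py_alt container_map parent_path default
instance (container_map : List (Option String × String)) (parent_path : Option String) (default : String) (out : String) : Decidable (Spec_resolve_parent_table_py container_map parent_path default out) := by unfold Spec_resolve_parent_table_py; infer_instance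

-- ===== CLAIM (what is proved, stated in full; the proofs are below) =====
def Claim_equal_resolve_parent_table_py : Prop := ∀ (container_map : List (Option String × String)) (parent_path : Option String) (default : String), Dom_resolve_parent_table_py container_map parent_path default → Spec_resolve_parent_table_py container_map parent_path default (resolve_parent_table_py container_map parent_path default)

-- ===== LEMMAS AND PROOFS =====

-- PySem's fuel-based splitOn with a single-character separator is Mathlib's List.splitOn
theorem pvSplitOn_go_eq (c : Char) (fuel : Nat) :
    ∀ (l cur : List Char) (acc : List (List Char)), l.length < fuel →
      PySem.Chars.splitOn.go [c] fuel l cur acc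
        = acc.reverse ++ (l.splitOn c).modifyHead (cur.reverse ++ ·) := by
  have hid : ∀ (L : List (List Char)), List.modifyHead (fun x => x) L = L := by
    intro L; cases L <;> rfl
  induction fuel with
  | zero => intro l cur acc h; omega
  | succ fuel ih =>
    intro l cur acc h
    cases l with
    | nil => simp [PySem.Chars.splitOn.go, List.splitOn]
    | cons a rest =>
      rw [PySem.Chars.splitOn.go]
      by_cases hc : a = c
      · subst hc
        have hp : [a].isPrefixOf (a :: rest) = true := by simp [List.isPrefixOf]
        rw [if_pos hp]
        simp only [List.length_cons] at h
        rw [ih _ _ _ (by simpa using Nat.lt_of_succ_lt_succ h)]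
        simp [List.splitOn, hid]
      · have hp : ¬ ([c].isPrefixOf (a :: rest) = true) := by
          simp [List.isPrefixOf]; exact fun hcc => absurd hcc.symm hc
        rw [if_neg hp]
        simp only [List.length_cons] at h
        rw [ih _ _ _ (Nat.lt_of_succ_lt_succ h)]
        simp only [List.splitOn, List.splitOnP_cons]
        rw [if_neg (by simpa using hc)]
        rw [List.modifyHead_modifyHead]
        have hfun : (fun x => (a :: cur).reverse ++ x)
            = ((fun x => cur.reverse ++ x) ∘ List.cons a) := by
          funext x; simp
        rw [hfun]

theorem pvSplitOn_eq (cs : List Char) (c : Char) :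
    PySem.Chars.splitOn cs [c] = cs.splitOn c := by
  rw [PySem.Chars.splitOn, pvSplitOn_go_eq c _ _ _ _ (Nat.lt_succ_self _)]
  cases h : cs.splitOn c <;> simp

-- last-dot decomposition: a path containing '.' is (rsplit prefix) ++ '.' :: suffix, '.'-free suffix
theorem pvLastDot (cs : List Char) (h : '.' ∈ cs) :
    cs = pvRsplitPrefix cs ++ '.' :: (cs.reverse.takeWhile (· ≠ '.')).reverse
      ∧ '.' ∉ (cs.reverse.takeWhile (· ≠ '.')).reverse := by
  have hmem : '.' ∈ cs.reverse := by simpa using h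
  have hd : cs.reverse.dropWhile (· ≠ '.') ≠ [] := by
    intro hnil
    have htd := List.takeWhile_append_dropWhile (p := (· ≠ '.')) (l := cs.reverse)
    rw [hnil, List.append_nil] at htd
    have := List.mem_takeWhile_imp (by rw [htd]; exact hmem)
    simp at this
  obtain ⟨x, t, hxt⟩ := List.exists_cons_of_ne_nil hd
  have hx : x = '.' := by
    have h4 : (cs.reverse.dropWhile (· ≠ '.')).head? = some x := by rw [hxt]; rfl
    rw [List.head?_eq_some_head hd] at h4
    have h6 := Option.some.inj h4
    have h2 := List.head_dropWhile_not (· ≠ '.') hd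
    rw [h6] at h2
    simpa using h2
  subst hx
  have hpre : pvRsplitPrefix cs = t.reverse := by
    rw [pvRsplitPrefix, hxt]
    simp
  have hrev : cs.reverse = cs.reverse.takeWhile (· ≠ '.') ++ '.' :: t := by
    conv_lhs => rw [← List.takeWhile_append_dropWhile (p := (· ≠ '.')) (l := cs.reverse)]
    rw [hxt]
  constructor
  · have hcs := congrArg List.reverse hrev
    rw [List.reverse_reverse] at hcs
    conv_lhs => rw [hcs, List.reverse_append]
    rw [hpre]
    simp
  · intro hmem'
    have := List.mem_takeWhile_imp (by simpa using hmem' : '.' ∈ cs.reverse.takeWhile (· ≠ '.'))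
    simp at this

-- splitting at the last dot: splitOn of the whole path = splitOn of the prefix ++ [suffix]
theorem pvSplitOn_concat (pre suf : List Char) (hsuf : '.' ∉ suf) :
    (pre ++ '.' :: suf).splitOn '.' = pre.splitOn '.' ++ [suf] := by
  simp only [List.splitOn]
  rw [List.splitOnP_append_cons _ _ _ _ (by simp)]
  rw [List.splitOnP_eq_single _ suf (by
    intro x hx hpx
    exact hsuf ((by simpa using hpx : x = '.') ▸ hx))]

-- the main invariant: B's recursion computes exactly A's segment loop followed by the fallback
theorem pvMain (cm : List (Option String × String)) (default : String) :
    ∀ (n : Nat) (cs : List Char), cs.length ≤ n →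
      pvBRec cm default cs
        = (match pvALoop cm (PySem.Chars.splitOn cs ['.']) with
           | some v => v
           | none => (pvLookup cm none).getD default) := by
  intro n
  induction n with
  | zero =>
    intro cs hlen
    have hcs : cs = [] := List.length_eq_zero_iff.mp (Nat.le_zero.mp hlen)
    subst hcs
    rw [pvBRec]
    have h0 : PySem.Chars.splitOn ([] : List Char) ['.'] = [[]] := by
      rw [pvSplitOn_eq]; rfl
    rw [h0, pvALoop.eq_def, dif_neg (by simp)]
    rw [show String.ofList (PySem.Chars.join ['.'] [([] : List Char)]) = String.ofList []
      from by simp [PySem.Chars.join, List.intercalate]]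
    cases h : pvLookup cm (some (String.ofList [])) <;> simp [h, pvALoop]
  | succ n ih =>
    intro cs hlen
    rw [pvBRec, pvALoop.eq_def]
    have hne : PySem.Chars.splitOn cs ['.'] ≠ [] := by
      rw [pvSplitOn_eq]; simp only [List.splitOn]; exact List.splitOnP_ne_nil _ _
    rw [dif_neg hne]
    have hjoin : PySem.Chars.join ['.'] (PySem.Chars.splitOn cs ['.']) = cs := by
      rw [pvSplitOn_eq, PySem.Chars.join]
      exact List.intercalate_splitOn cs '.'
    rw [hjoin]
    cases hlook : pvLookup cm (some (String.ofList cs)) with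
    | some v => simp
    | none =>
      simp only
      by_cases hdot : '.' ∈ cs
      · have hcsne : cs ≠ [] := List.ne_nil_of_mem hdot
        rw [if_pos ⟨hcsne, hdot⟩]
        obtain ⟨hdecomp, hsuf⟩ := pvLastDot cs hdot
        have hsplit : cs.splitOn '.' = (pvRsplitPrefix cs).splitOn '.'
            ++ [(cs.reverse.takeWhile (· ≠ '.')).reverse] := by
          conv_lhs => rw [hdecomp]
          exact pvSplitOn_concat _ _ hsuf
        have hdrop : (PySem.Chars.splitOn cs ['.']).dropLast
            = PySem.Chars.splitOn (pvRsplitPrefix cs) ['.'] := by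
          rw [pvSplitOn_eq, pvSplitOn_eq, hsplit, List.dropLast_concat]
        rw [hdrop]
        have hlt : (pvRsplitPrefix cs).length ≤ n := by
          have : (pvRsplitPrefix cs).length < cs.length := by
            have := congrArg List.length hdecomp
            simp only [List.length_append, List.length_cons] at this
            omega
          omega
        exact ih _ hlt
      · have hcond : ¬ (cs ≠ [] ∧ '.' ∈ cs) := fun hc => hdot hc.2
        rw [if_neg hcond]
        have hsingle : PySem.Chars.splitOn cs ['.'] = [cs] := by
          rw [pvSplitOn_eq]
          simp only [List.splitOn]
          exact List.splitOnP_eq_single _ cs (by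
            intro x hx hpx
            exact hdot ((by simpa using hpx : x = '.') ▸ hx))
        have hnone : pvALoop cm (PySem.Chars.splitOn cs ['.']).dropLast = none := by
          rw [hsingle, show ([cs] : List (List Char)).dropLast = [] from rfl,
            pvALoop.eq_def]
          simp
        rw [hnone]

-- ===== VERDICT (by name: the statement is the Claim_ definition above) =====
theorem resolve_parent_table_py_spec : Claim_equal_resolve_parent_table_py := by
  intro cm pp default _
  unfold Spec_resolve_parent_table_py
  cases pp with
  | none =>
    simp only [resolve_parent_table_py, resolve_parent_table_py_alt]
    cases h : pvLookup cm none <;> simp [h]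
  | some s =>
    simp only [resolve_parent_table_py, resolve_parent_table_py_alt]
    have hkey : String.ofList s.toList = s := by simp
    cases h : pvLookup cm (some s) with
    | some v =>
      rw [pvBRec, hkey, h]
    | none =>
      by_cases hne : s.toList = []
      · rw [pvBRec, hkey, h]
        simp [hne]
      · rw [pvMain cm default s.toList.length s.toList le_rfl]
        rw [if_pos hne]
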